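-- pv_equiv track=rewrite | github.com/EdNawrocki/ScrabbleBot | classes/Anagrammer.py | GetAlphagramsWith
-- ===== SOURCE A (Python) =====
-- def GetAlphagramsWith(s, l, i, j, includes, current):
--     if len(current) == l and j == len(includes):
--         return [current]
--     elif len(current) == l:
--         return []
--     if i >= len(s):
--         return []
--     #Don't take current letter
--     nt = GetAlphagramsWith(s, l, i+1, j, includes, current)
--     if j != len(includes) and s[i] == includes[j]:
--         j += 1
--     t = GetAlphagramsWith(s, l, i+1, j, includes, current+s[i])
--     return nt + t
-- ===== SOURCE B (Python) =====
-- def _combos(t, r):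
--     """All length-r subsequences of t, as strings, in lexicographic
--     order over positions."""
--     if r == 0:
--         return ['']
--     if not t:
--         return []
--     rest = t[1:]
--     return [t[0] + c for c in _combos(rest, r - 1)] + _combos(rest, r)
--
--
-- def GetAlphagramsWith(s, l, i, j, includes, current):
--     r = l - len(current)
--     if r < 0:
--         return []
--     need = includes[j:]
--     out = []
--     for combo in _combos(s[i:], r):
--         k = 0
--         for ch in combo:
--             if k < len(need) and need[k] == ch:
--                 k += 1
--         if k == len(need):
--             out.append(current + combo)
--     out.reverse()
--     return out
-- ===== Notes on version B (the rewrite author's own statement) =====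
-- stated objective: alternative
-- what changed: The recursive take/skip DFS with interleaved matching of includes is replaced by explicit enumeration of the length-(l-len(current)) combinations of s[i:] (own recursive generator, lexicographic position order), a greedy pointer check that includes[j:] is an in-order subsequence of each combination, and a final reverse (A's skip-first DFS emits exactly reversed-combinations order); …
-- outside the precondition, e.g. on GetAlphagramsWith('ab', 1, -1, 0, '', ''): A returns ['b', 'a', 'b'], B returns ['b']; on GetAlphagramsWith('', 0, 0, 5, 'x', ''): A returns [], B returns ['']; on GetAlphagramsWith('x', 0, 0, -1, '', ''): A returns [], B returns ['']
import Mathlib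
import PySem

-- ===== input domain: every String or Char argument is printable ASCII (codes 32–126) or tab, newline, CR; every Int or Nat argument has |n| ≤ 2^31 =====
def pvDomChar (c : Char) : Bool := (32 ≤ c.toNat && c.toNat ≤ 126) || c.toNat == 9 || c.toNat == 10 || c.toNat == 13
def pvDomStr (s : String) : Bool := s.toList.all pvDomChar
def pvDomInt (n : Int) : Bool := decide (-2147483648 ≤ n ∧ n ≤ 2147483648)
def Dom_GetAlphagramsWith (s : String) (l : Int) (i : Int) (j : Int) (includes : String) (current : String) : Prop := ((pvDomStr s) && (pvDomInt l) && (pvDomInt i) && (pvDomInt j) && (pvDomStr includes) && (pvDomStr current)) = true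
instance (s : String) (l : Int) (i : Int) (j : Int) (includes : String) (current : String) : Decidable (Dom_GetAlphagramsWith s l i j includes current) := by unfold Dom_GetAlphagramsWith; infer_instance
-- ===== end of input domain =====

-- B replaces A's take/skip DFS (with interleaved matching of `includes`) by explicit enumeration of the
-- length-(l-|current|) combinations of s[i:] plus a greedy subsequence filter and a final reverse.

-- ===== PORT A =====
def GetAlphagramsWith (s : String) (l : Int) (i : Int) (j : Int) (includes : String) (current : String) : List String :=
  if PySem.Str.len current = l ∧ j = PySem.Str.len includes then [current]
  else if PySem.Str.len current = l then []
  else if h : i ≥ PySem.Str.len s then []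
  else
    let nt := GetAlphagramsWith s l (i+1) j includes current
    match PySem.Str.pyGet? s i with
    | none => []          -- s[i] : IndexError (outside Pre_)
    | some c =>
      if j ≠ PySem.Str.len includes then
        match PySem.Str.pyGet? includes j with
        | none => []      -- includes[j] : IndexError (outside Pre_)
        | some d =>
          nt ++ GetAlphagramsWith s l (i+1) (if c = d then j + 1 else j) includes (current.push c)
      else nt ++ GetAlphagramsWith s l (i+1) j includes (current.push c)
termination_by (PySem.Str.len s - i).toNat
decreasing_by all_goals omega

-- ===== PORT B =====
-- all length-r subsequences of t, in lexicographic (combinations) order over positions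
def pvCombos (t : List Char) (r : Int) : List (List Char) :=
  if r = 0 then [[]]
  else
    match t with
    | [] => []
    | c :: rest => ((pvCombos rest (r - 1)).map (fun combo => c :: combo)) ++ pvCombos rest r

def GetAlphagramsWith_alt (s : String) (l : Int) (i : Int) (j : Int) (includes : String) (current : String) : List String :=
  let r := l - PySem.Str.len current
  if r < 0 then []
  else
    let need := (PySem.Str.slice includes (some j) none).toList
    let letters := (PySem.Str.slice s (some i) none).toList
    let out := (pvCombos letters r).foldl
      (fun out combo =>
        let k := combo.foldl (fun k ch => if k < need.length ∧ need.getD k ch = ch then k + 1 else k) 0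
        if k = need.length then out ++ [String.ofList (current.toList ++ combo)] else out) []
    out.reverse

-- ===== PRECONDITION & SPEC =====
-- Pre_ excludes the inputs on which A raises IndexError (a scan index i or j below the negative-index
-- range, reached mid-recursion) and the corners where a scan index is negative or j is past
-- len(includes): there Python's negative-index wraparound and A's `j == len(includes)` equality test
-- make A's value an accident of the pointer representation, and B's plain suffix reading is as
-- defensible, so neither value is the specified one.
def Pre_GetAlphagramsWith (s : String) (l : Int) (i : Int) (j : Int) (includes : String) (current : String) : Prop :=
  (PySem.Str.len current = l ∧ j ≤ PySem.Str.len includes ∧ (0 ≤ j ∨ 0 < PySem.Str.len includes))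
  ∨ (PySem.Str.len current ≠ l ∧ PySem.Str.len s ≤ i)
  ∨ (l < PySem.Str.len current ∧ -(PySem.Str.len s) ≤ i
      ∧ -(PySem.Str.len includes) ≤ j ∧ j ≤ PySem.Str.len includes)
  ∨ (PySem.Str.len current < l ∧ 0 ≤ i ∧ 0 ≤ j ∧ j ≤ PySem.Str.len includes)
instance (s : String) (l : Int) (i : Int) (j : Int) (includes : String) (current : String) : Decidable (Pre_GetAlphagramsWith s l i j includes current) := by unfold Pre_GetAlphagramsWith; infer_instance

def pvWitness_GetAlphagramsWith : String × Int × Int × Int × String × String := ("abcb", 2, 0, 0, "b", "")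

def Spec_GetAlphagramsWith (s : String) (l : Int) (i : Int) (j : Int) (includes : String) (current : String) (out : List String) : Prop := out = GetAlphagramsWith_alt s l i j includes current
instance (s : String) (l : Int) (i : Int) (j : Int) (includes : String) (current : String) (out : List String) : Decidable (Spec_GetAlphagramsWith s l i j includes current out) := by unfold Spec_GetAlphagramsWith; infer_instance

-- ===== CLAIM (what is proved, stated in full; the proofs are below) =====
def Claim_equal_GetAlphagramsWith : Prop := ∀ (s : String) (l : Int) (i : Int) (j : Int) (includes : String) (current : String), Dom_GetAlphagramsWith s l i j includes current → Pre_GetAlphagramsWith s l i j includes current → Spec_GetAlphagramsWith s l i j includes current (GetAlphagramsWith s l i j includes current)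

-- ===== LEMMAS AND PROOFS =====

-- remaining suffix of `need` after greedily matching one letter / a whole combination
def pvAdvance (need : List Char) (c : Char) : List Char :=
  match need with
  | [] => []
  | n :: ns => if c = n then ns else need

def pvMatchRem : List Char → List Char → List Char
  | need, [] => need
  | need, c :: cs => pvMatchRem (pvAdvance need c) cs

-- A's recursion, abstracted to the remaining suffixes of s and includes
def pvAux (cs : List Char) (need : List Char) (l : Int) (cur : String) : List String :=
  if PySem.Str.len cur = l then (if need = [] then [cur] else [])
  else
    match cs with
    | [] => []
    | c :: cs' => pvAux cs' need l cur ++ pvAux cs' (pvAdvance need c) l (cur.push c)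


lemma pvLen_push (cur : String) (c : Char) : PySem.Str.len (cur.push c) = PySem.Str.len cur + 1 := by
  simp [PySem.Str.len_eq]

lemma pvAdvance_length_le (need : List Char) (c : Char) : (pvAdvance need c).length ≤ need.length := by
  cases need with
  | nil => simp [pvAdvance]
  | cons n ns => simp only [pvAdvance]; split <;> simp

lemma pvAux_gt (cs : List Char) : ∀ (need : List Char) (l : Int) (cur : String),
    l < PySem.Str.len cur → pvAux cs need l cur = [] := by
  induction cs with
  | nil => intro need l cur h; unfold pvAux; rw [if_neg (by omega)]
  | cons c cs ih =>
    intro need l cur h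
    unfold pvAux; rw [if_neg (by omega)]
    show pvAux cs need l cur ++ pvAux cs (pvAdvance need c) l (cur.push c) = []
    rw [ih _ _ _ h, ih _ _ _ (by rw [pvLen_push]; omega)]
    rfl

lemma pvCombos_zero (t : List Char) : pvCombos t 0 = [[]] := by
  unfold pvCombos; rw [if_pos rfl]

def pvPos (n : Nat) (i : Int) : Nat := if 0 ≤ i then i.toNat else (n + i).toNat

lemma pvPos_lt (n : Nat) (i : Int) (h1 : -(n : Int) ≤ i) (h2 : i < n) : pvPos n i < n := by
  unfold pvPos; split <;> omega

-- the letter stream A actually scans from start index i (Python negative indices wrap)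
def pvStream (cs : List Char) (i : Int) : List Char :=
  if 0 ≤ i then cs.drop i.toNat else cs.drop (cs.length + i).toNat ++ cs

lemma pvStream_nil (cs : List Char) (i : Int) (h : (cs.length : Int) ≤ i) : pvStream cs i = [] := by
  unfold pvStream
  rw [if_pos (by omega)]
  exact List.drop_eq_nil_of_le (by omega)

lemma pvStream_nonneg (cs : List Char) (i : Int) (h : 0 ≤ i) :
    pvStream cs i = cs.drop i.toNat := by
  unfold pvStream; rw [if_pos h]

lemma pvStream_ne_nil (cs : List Char) (i : Int) (h1 : -(cs.length : Int) ≤ i)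
    (h2 : i < cs.length) : pvStream cs i ≠ [] := by
  unfold pvStream
  split
  · simp only [ne_eq, List.drop_eq_nil_iff]; omega
  · intro hh
    rcases List.append_eq_nil_iff.mp hh with ⟨-, h4⟩
    have : cs.length = 0 := by rw [h4]; rfl
    omega

lemma pvGet_eq (cs : List Char) (i : Int) (h1 : -(cs.length : Int) ≤ i) (h2 : i < cs.length)
    (hp : pvPos cs.length i < cs.length) :
    PySem.List.pyGet? cs i = some cs[pvPos cs.length i] := by
  by_cases h0 : 0 ≤ i
  · have hpos : pvPos cs.length i = i.toNat := by unfold pvPos; rw [if_pos h0]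
    rw [PySem.List.pyGet?_of_nonneg cs h0]
    simp only [hpos] at hp ⊢
    rw [List.getElem?_eq_getElem hp]
  · have hk1 : 0 < (-i).toNat := by omega
    have hk2 : (-i).toNat ≤ cs.length := by omega
    have hi' : i = -(((-i).toNat : Nat) : Int) := by omega
    have hpos : cs.length - (-i).toNat = pvPos cs.length i := by
      unfold pvPos; rw [if_neg h0]; omega
    have hpg := PySem.List.pyGet?_neg_natCast cs (-i).toNat hk1 hk2
    rw [← hi', hpos, List.getElem?_eq_getElem hp] at hpg
    exact hpg

lemma pvStream_cons (cs : List Char) (i : Int) (h1 : -(cs.length : Int) ≤ i) (h2 : i < cs.length)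
    (hp : pvPos cs.length i < cs.length) :
    pvStream cs i = cs[pvPos cs.length i] :: pvStream cs (i + 1) := by
  by_cases h0 : 0 ≤ i
  · have hpos : pvPos cs.length i = i.toNat := by unfold pvPos; rw [if_pos h0]
    unfold pvStream
    rw [if_pos h0, if_pos (by omega),
        List.drop_eq_getElem_cons (by omega), show (i + 1).toNat = i.toNat + 1 by omega]
    simp only [hpos]
  · have hpos : pvPos cs.length i = (cs.length + i).toNat := by unfold pvPos; rw [if_neg h0]
    unfold pvStream
    rw [if_neg h0]
    by_cases h01 : 0 ≤ i + 1
    · rw [if_pos h01,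
          List.drop_eq_getElem_cons (show (cs.length + i).toNat < cs.length by omega),
          show (cs.length + i).toNat + 1 = cs.length by omega, List.drop_length,
          show (i + 1).toNat = 0 by omega, List.drop_zero]
      simp [hpos]
    · rw [if_neg h01,
          List.drop_eq_getElem_cons (show (cs.length + i).toNat < cs.length by omega),
          show (cs.length + i).toNat + 1 = (cs.length + (i + 1)).toNat by omega,
          List.cons_append]
      simp [hpos]

lemma pvAuxA_eq (s : String) (l : Int) (includes : String) (n : Nat) :
    ∀ (i j : Int) (current : String), (PySem.Str.len s - i).toNat ≤ n →
      (-(PySem.Str.len s) ≤ i ∨ PySem.Str.len current = l) →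
      -(PySem.Str.len includes) ≤ j → j ≤ PySem.Str.len includes →
      GetAlphagramsWith s l i j includes current
        = pvAux (pvStream s.toList i) (pvStream includes.toList j) l current := by
  have hlen_s := PySem.Str.len_eq s
  have hlen_inc := PySem.Str.len_eq includes
  induction n with
  | zero =>
    intro i j current hn hior hj hjle
    rw [GetAlphagramsWith]
    by_cases h1 : PySem.Str.len current = l ∧ j = PySem.Str.len includes
    · rw [if_pos h1]
      unfold pvAux
      rw [if_pos h1.1, if_pos (pvStream_nil _ _ (by omega))]
    · rw [if_neg h1]
      by_cases h2 : PySem.Str.len current = l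
      · have hjne : j ≠ PySem.Str.len includes := by tauto
        rw [if_pos h2]
        unfold pvAux
        rw [if_pos h2, if_neg (pvStream_ne_nil _ _ (by omega) (by omega))]
      · rw [if_neg h2]
        rw [dif_pos (show i ≥ PySem.Str.len s by omega)]
        rw [pvStream_nil _ _ (by omega)]
        unfold pvAux
        rw [if_neg h2]
  | succ n ih =>
    intro i j current hn hior hj hjle
    rw [GetAlphagramsWith]
    by_cases h1 : PySem.Str.len current = l ∧ j = PySem.Str.len includes
    · rw [if_pos h1]
      unfold pvAux
      rw [if_pos h1.1, if_pos (pvStream_nil _ _ (by omega))]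
    · rw [if_neg h1]
      by_cases h2 : PySem.Str.len current = l
      · have hjne : j ≠ PySem.Str.len includes := by tauto
        rw [if_pos h2]
        unfold pvAux
        rw [if_pos h2, if_neg (pvStream_ne_nil _ _ (by omega) (by omega))]
      · rw [if_neg h2]
        have him : -(PySem.Str.len s) ≤ i := by tauto
        by_cases h3 : i ≥ PySem.Str.len s
        · rw [dif_pos h3, pvStream_nil _ _ (by omega)]
          unfold pvAux
          rw [if_neg h2]
        · rw [dif_neg h3]
          have hpi : pvPos s.toList.length i < s.toList.length := pvPos_lt _ _ (by omega) (by omega)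
          have hc : PySem.Str.pyGet? s i = some (s.toList[pvPos s.toList.length i]'hpi) := by
            rw [PySem.Str.pyGet?_eq]
            exact pvGet_eq s.toList i (by omega) (by omega) hpi
          have hdrop : pvStream s.toList i
              = (s.toList[pvPos s.toList.length i]'hpi) :: pvStream s.toList (i + 1) :=
            pvStream_cons s.toList i (by omega) (by omega) hpi
          simp only [hc]
          conv_rhs => rw [hdrop]
          unfold pvAux
          rw [if_neg h2]
          show _ = pvAux (pvStream s.toList (i + 1)) (pvStream includes.toList j) l current
            ++ pvAux (pvStream s.toList (i + 1))
                 (pvAdvance (pvStream includes.toList j) (s.toList[pvPos s.toList.length i]'hpi)) l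
                 (current.push (s.toList[pvPos s.toList.length i]'hpi))
          by_cases h4 : j ≠ PySem.Str.len includes
          · have hpj : pvPos includes.toList.length j < includes.toList.length :=
              pvPos_lt _ _ (by omega) (by omega)
            have hd : PySem.Str.pyGet? includes j
                = some (includes.toList[pvPos includes.toList.length j]'hpj) := by
              rw [PySem.Str.pyGet?_eq]
              exact pvGet_eq includes.toList j (by omega) (by omega) hpj
            have hdropj : pvStream includes.toList j
                = (includes.toList[pvPos includes.toList.length j]'hpj)
                    :: pvStream includes.toList (j + 1) :=
              pvStream_cons includes.toList j (by omega) (by omega) hpj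
            rw [if_pos h4, hd]
            show GetAlphagramsWith s l (i+1) j includes current ++
                GetAlphagramsWith s l (i+1)
                  (if s.toList[pvPos s.toList.length i]'hpi
                      = includes.toList[pvPos includes.toList.length j]'hpj then j + 1 else j)
                  includes (current.push (s.toList[pvPos s.toList.length i]'hpi)) = _
            by_cases hcd : s.toList[pvPos s.toList.length i]'hpi
                = includes.toList[pvPos includes.toList.length j]'hpj
            · rw [if_pos hcd]
              have hadv : pvAdvance (pvStream includes.toList j)
                    (s.toList[pvPos s.toList.length i]'hpi)
                  = pvStream includes.toList (j + 1) := by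
                rw [hdropj]; simp only [pvAdvance]; rw [if_pos hcd]
              rw [hadv, ih (i+1) j current (by omega) (Or.inl (by omega)) hj hjle,
                  ih (i+1) (j+1) (current.push _) (by omega) (Or.inl (by omega))
                    (by omega) (by omega)]
            · rw [if_neg hcd]
              have hadv : pvAdvance (pvStream includes.toList j)
                    (s.toList[pvPos s.toList.length i]'hpi)
                  = pvStream includes.toList j := by
                rw [hdropj]; simp only [pvAdvance]; rw [if_neg hcd, ← hdropj]
              rw [hadv, ih (i+1) j current (by omega) (Or.inl (by omega)) hj hjle,
                  ih (i+1) j (current.push _) (by omega) (Or.inl (by omega)) hj hjle]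
          · have hjeq : j = PySem.Str.len includes := by tauto
            have hdropj : pvStream includes.toList j = [] := pvStream_nil _ _ (by omega)
            rw [if_neg h4]
            have hadv : pvAdvance (pvStream includes.toList j)
                  (s.toList[pvPos s.toList.length i]'hpi)
                = pvStream includes.toList j := by rw [hdropj]; rfl
            rw [hadv, ih (i+1) j current (by omega) (Or.inl (by omega)) hj hjle,
                ih (i+1) j (current.push _) (by omega) (Or.inl (by omega)) hj hjle]


lemma pvMatchRem_length_le (combo : List Char) : ∀ (need : List Char),
    (pvMatchRem need combo).length ≤ need.length := by
  induction combo with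
  | nil => intro need; simp [pvMatchRem]
  | cons c cs ih =>
    intro need
    calc (pvMatchRem (pvAdvance need c) cs).length ≤ (pvAdvance need c).length := ih _
    _ ≤ need.length := pvAdvance_length_le _ _

lemma pvGreedy_fold (need : List Char) (combo : List Char) : ∀ (k : Nat), k ≤ need.length →
    combo.foldl (fun k ch => if k < need.length ∧ need.getD k ch = ch then k + 1 else k) k
      = need.length - (pvMatchRem (need.drop k) combo).length := by
  induction combo with
  | nil => intro k hk; simp [pvMatchRem]; omega
  | cons ch cs ih =>
    intro k hk
    simp only [List.foldl_cons, pvMatchRem]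
    by_cases h1 : k < need.length
    · have hdrop : need.drop k = need[k] :: need.drop (k + 1) := by
        rw [List.drop_eq_getElem_cons h1]
      have hgetD : need.getD k ch = need[k] := List.getD_eq_getElem need ch h1
      by_cases h2 : need[k] = ch
      · rw [if_pos ⟨h1, by rw [hgetD, h2]⟩, ih _ (by omega), hdrop]
        simp [pvMatchRem, pvAdvance, h2]
      · rw [if_neg (by rw [hgetD]; tauto), ih _ hk]
        have hadv : pvAdvance (need.drop k) ch = need.drop k := by
          rw [hdrop]; simp only [pvAdvance]
          rw [if_neg (by intro hh; exact h2 hh.symm), ← hdrop]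
        rw [hadv]
    · have hdrop : need.drop k = [] := by simp [show k = need.length by omega]
      rw [if_neg (by tauto), ih _ hk]
      have hadv : pvAdvance (need.drop k) ch = need.drop k := by rw [hdrop]; rfl
      rw [hadv]

lemma pvAux_eq_combos (cs : List Char) : ∀ (need : List Char) (l : Int) (cur : String),
    PySem.Str.len cur ≤ l →
    pvAux cs need l cur =
      (((pvCombos cs (l - PySem.Str.len cur)).filter
          (fun combo => decide (pvMatchRem need combo = []))).map
        (fun combo => String.ofList (cur.toList ++ combo))).reverse := by
  induction cs with
  | nil =>
    intro need l cur hle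
    unfold pvAux
    by_cases hl : PySem.Str.len cur = l
    · rw [if_pos hl, show l - PySem.Str.len cur = 0 by omega, pvCombos_zero]
      by_cases hn : need = []
      · simp [hn, pvMatchRem]
      · simp [hn, pvMatchRem]
    · rw [if_neg hl]
      show ([] : List String) = _
      rw [show pvCombos [] (l - PySem.Str.len cur) = [] from by
        unfold pvCombos; rw [if_neg (by omega)]]
      simp
  | cons c cs ih =>
    intro need l cur hle
    by_cases hl : PySem.Str.len cur = l
    · unfold pvAux
      rw [if_pos hl, show l - PySem.Str.len cur = 0 by omega, pvCombos_zero]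
      by_cases hn : need = []
      · simp [hn, pvMatchRem]
      · simp [hn, pvMatchRem]
    · unfold pvAux
      rw [if_neg hl]
      show pvAux cs need l cur ++ pvAux cs (pvAdvance need c) l (cur.push c) = _
      rw [show pvCombos (c :: cs) (l - PySem.Str.len cur)
            = ((pvCombos cs (l - PySem.Str.len cur - 1)).map (fun combo => c :: combo))
              ++ pvCombos cs (l - PySem.Str.len cur) from by
        conv_lhs => rw [pvCombos]
        rw [if_neg (by omega)]]
      rw [List.filter_append, List.map_append, List.reverse_append, List.filter_map, List.map_map]
      have hfun1 : ((fun combo => decide (pvMatchRem need combo = [])) ∘ (fun combo => c :: combo))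
          = (fun combo => decide (pvMatchRem (pvAdvance need c) combo = [])) := rfl
      have hfun2 : ((fun combo => String.ofList (cur.toList ++ combo)) ∘ (fun combo => c :: combo))
          = (fun combo => String.ofList ((cur.push c).toList ++ combo)) := by
        funext combo; simp [String.toList_push]
      rw [hfun1, hfun2,
          ← ih need l cur hle,
          show l - PySem.Str.len cur - 1 = l - PySem.Str.len (cur.push c) by rw [pvLen_push]; omega,
          ← ih (pvAdvance need c) l (cur.push c) (by rw [pvLen_push]; omega)]

lemma pvSlice_nonneg (t : String) (a : Int) (h : 0 ≤ a) :
    (PySem.Str.slice t (some a) none).toList = t.toList.drop a.toNat := by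
  rw [show (PySem.Str.slice t (some a) none).toList
        = PySem.List.slice t.toList (some a) none from by simp]
  exact PySem.List.slice_from t.toList h

lemma pvSlice_ne_nil (t : String) (a : Int) (h2 : a < PySem.Str.len t)
    (h3 : 0 < PySem.Str.len t) : PySem.List.slice t.toList (some a) none ≠ [] := by
  have hlen := PySem.Str.len_eq t
  by_cases h0 : 0 ≤ a
  · rw [PySem.List.slice_from t.toList h0]
    simp only [ne_eq, List.drop_eq_nil_iff]
    omega
  · by_cases h1 : -(PySem.Str.len t) ≤ a
    · have hk : 0 < (-a).toNat := by omega
      have ha : a = -(((-a).toNat : Nat) : Int) := by omega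
      conv_lhs => rw [ha]
      rw [PySem.List.slice_from_neg_natCast t.toList (-a).toNat hk]
      simp only [ne_eq, List.drop_eq_nil_iff]
      omega
    · rw [PySem.List.slice_some_none]
      have hc : PySem.List.clampIdx t.toList.length a = 0 := by
        unfold PySem.List.clampIdx
        split_ifs <;> omega
      rw [hc, List.drop_zero]
      intro hh
      have : t.toList.length = 0 := by rw [hh]; rfl
      omega

-- B's foldl loop, rewritten as filter + map + reverse
lemma pvAltB_eq (s : String) (l : Int) (i : Int) (j : Int) (includes : String) (current : String) :
    GetAlphagramsWith_alt s l i j includes current =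
      if l - PySem.Str.len current < 0 then [] else
        (((pvCombos (PySem.Str.slice s (some i) none).toList (l - PySem.Str.len current)).filter
            (fun combo => decide (pvMatchRem (PySem.Str.slice includes (some j) none).toList combo = []))).map
          (fun combo => String.ofList (current.toList ++ combo))).reverse := by
  simp only [GetAlphagramsWith_alt]
  by_cases hc : l - PySem.Str.len current < 0
  · simp only [if_pos hc]
  · simp only [if_neg hc]
    set need := (PySem.Str.slice includes (some j) none).toList with hneed
    have hfold := PySem.List.foldl_append_if
      (fun combo : List Char => decide ((combo.foldl (fun k ch =>
          if k < need.length ∧ need.getD k ch = ch then k + 1 else k) 0) = need.length))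
      (fun combo => String.ofList (current.toList ++ combo))
      (pvCombos (PySem.Str.slice s (some i) none).toList (l - PySem.Str.len current)) []
    simp only [decide_eq_true_eq] at hfold
    rw [hfold, List.nil_append]
    congr 1
    refine congrArg _ ?_
    apply List.filter_congr
    intro combo _
    have hg := pvGreedy_fold need combo 0 (Nat.zero_le _)
    rw [List.drop_zero] at hg
    have hle := pvMatchRem_length_le combo need
    simp only [decide_eq_decide]
    rw [hg]
    constructor
    · intro h
      exact List.eq_nil_of_length_eq_zero (by omega)
    · intro h
      rw [h]
      simp

lemma pvA_terminal (s : String) (l : Int) (i : Int) (j : Int) (includes : String)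
    (current : String) (h2 : PySem.Str.len current ≠ l) (h3 : PySem.Str.len s ≤ i) :
    GetAlphagramsWith s l i j includes current = [] := by
  rw [GetAlphagramsWith, if_neg (by tauto), if_neg h2, dif_pos (by omega)]

lemma pvB_rne_empty (s : String) (l : Int) (i : Int) (j : Int) (includes : String)
    (current : String) (hr : l - PySem.Str.len current ≠ 0) (hi0 : PySem.Str.len s ≤ i) :
    GetAlphagramsWith_alt s l i j includes current = [] := by
  have hlen := PySem.Str.len_eq s
  rw [pvAltB_eq]
  by_cases hc : l - PySem.Str.len current < 0
  · rw [if_pos hc]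
  · rw [if_neg hc]
    have hlet : (PySem.Str.slice s (some i) none).toList = [] := by
      rw [pvSlice_nonneg s i (by omega)]
      exact List.drop_eq_nil_of_le (by omega)
    rw [hlet, show pvCombos [] (l - PySem.Str.len current) = [] from by
      unfold pvCombos; rw [if_neg hr]]
    rfl

-- ===== VERDICT (by name: the statement is the Claim_ definition above) =====
theorem GetAlphagramsWith_spec : Claim_equal_GetAlphagramsWith := by
  intro s l i j includes current _ hpre
  unfold Spec_GetAlphagramsWith
  have hleninc := PySem.Str.len_eq includes
  rcases hpre with ⟨hcur, hj2, hj3⟩ | ⟨hcur, hiL⟩ | ⟨hcur, hi1, hj1, hj2⟩ | ⟨hcur, hi0, hj0, hj2⟩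
  · -- len(current) == l : both return [current] iff the remaining requirement is empty
    rw [pvAltB_eq, if_neg (by omega), show l - PySem.Str.len current = 0 by omega, pvCombos_zero]
    by_cases hje : j = PySem.Str.len includes
    · have hnd : (PySem.Str.slice includes (some j) none).toList = [] := by
        rw [pvSlice_nonneg includes j (by omega)]
        exact List.drop_eq_nil_of_le (by omega)
      rw [GetAlphagramsWith, if_pos ⟨hcur, hje⟩, hnd]
      simp [pvMatchRem]
    · have hnd : PySem.List.slice includes.toList (some j) none ≠ [] := by
        rcases hj3 with h0j | hpos
        · exact pvSlice_ne_nil includes j (by omega) (by omega)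
        · exact pvSlice_ne_nil includes j (by omega) hpos
      rw [GetAlphagramsWith, if_neg (by tauto), if_pos hcur]
      simp [pvMatchRem, hnd]
  · -- len(current) != l and i past the end: both []
    rw [pvA_terminal s l i j includes current hcur hiL,
        pvB_rne_empty s l i j includes current (by omega) hiL]
  · -- current already longer than l: A's DFS never reaches length l, B sees r < 0
    rw [pvAuxA_eq s l includes (PySem.Str.len s - i).toNat i j current le_rfl (Or.inl hi1) hj1 hj2,
        pvAux_gt _ _ _ _ (by omega), pvAltB_eq, if_pos (by omega)]
  · -- main region: nonnegative scan pointers, current shorter than l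
    have hlens := PySem.Str.len_eq s
    rw [pvAuxA_eq s l includes (PySem.Str.len s - i).toNat i j current le_rfl
          (Or.inl (by omega)) (by omega) hj2,
        pvStream_nonneg s.toList i hi0, pvStream_nonneg includes.toList j hj0,
        pvAux_eq_combos _ _ _ _ (by omega), pvAltB_eq, if_neg (by omega),
        pvSlice_nonneg s i hi0, pvSlice_nonneg includes j hj0]
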